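-- pv_equiv track=rewrite | github.com/Hadi-jawdi/Theranous | prescription_api/services.py | _get_fallback_translation
-- ===== SOURCE A (Python) =====
-- def _get_fallback_translation(english_text: str) -> str:
--     """Provide fallback Persian translation"""
--     # Simple word-by-word translation for common medical terms
--     translations = {
--         'medication': 'دارو',
--         'medicine': 'دارو',
--         'pain': 'درد',
--         'fever': 'تب',
--         'infection': 'عفونت',
--         'antibiotic': 'آنتی‌بیوتیک',
--         'tablet': 'قرص',
--         'capsule': 'کپسول',
--         'doctor': 'دکتر',
--         'treatment': 'درمان',
--         'dosage': 'دوز',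
--         'side effects': 'عوارض جانبی'
--     }
--
--     # Simple replacement (not ideal but better than nothing)
--     persian_text = english_text
--     for eng, per in translations.items():
--         persian_text = persian_text.replace(eng, per)
--
--     return f"ترجمه فارسی: {persian_text}"
-- ===== SOURCE B (Python) =====
-- # Single left-to-right scan replacing the first matching key at each position
-- # (instead of A's 12 sequential full-text replace passes).
-- _PAIRS = [
--     ('medication', 'دارو'),
--     ('medicine', 'دارو'),
--     ('pain', 'درد'),
--     ('fever', 'تب'),
--     ('infection', 'عفونت'),
--     ('antibiotic', 'آنتی‌بیوتیک'),
--     ('tablet', 'قرص'),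
--     ('capsule', 'کپسول'),
--     ('doctor', 'دکتر'),
--     ('treatment', 'درمان'),
--     ('dosage', 'دوز'),
--     ('side effects', 'عوارض جانبی'),
-- ]
--
--
-- def _get_fallback_translation(english_text: str) -> str:
--     """Provide fallback Persian translation"""
--     out = []
--     i = 0
--     n = len(english_text)
--     while i < n:
--         for eng, per in _PAIRS:
--             if english_text.startswith(eng, i):
--                 out.append(per)
--                 i += len(eng)
--                 break
--         else:
--             out.append(english_text[i])
--             i += 1
--     return "ترجمه فارسی: " + "".join(out)
-- ===== Notes on version B (the rewrite author's own statement) =====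
-- stated objective: alternative
-- what changed: Replaces A's 12 sequential full-text str.replace passes (one per dictionary entry) by a single left-to-right scan that substitutes the first matching key at each position, traversing the text once; inputs containing the substring 'treatmentablet' (the only overlap between two keys, where the two strategies pick different matches) are excluded by Pre_.
-- outside the precondition, e.g. on _get_fallback_translation('treatmentablet'): A returns 'ترجمه فارسی: treatmenقرص', B returns 'ترجمه فارسی: درمانablet'
import Mathlib
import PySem

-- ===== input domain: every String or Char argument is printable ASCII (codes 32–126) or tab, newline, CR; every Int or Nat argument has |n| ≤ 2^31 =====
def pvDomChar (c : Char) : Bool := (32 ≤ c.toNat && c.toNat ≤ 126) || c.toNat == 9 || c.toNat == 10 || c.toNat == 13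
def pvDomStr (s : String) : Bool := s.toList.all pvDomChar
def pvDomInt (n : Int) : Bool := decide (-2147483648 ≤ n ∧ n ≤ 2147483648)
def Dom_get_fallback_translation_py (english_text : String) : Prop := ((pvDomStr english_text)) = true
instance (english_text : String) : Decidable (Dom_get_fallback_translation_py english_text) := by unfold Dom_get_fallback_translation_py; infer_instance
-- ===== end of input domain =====

-- B replaces A's 12 sequential full-text str.replace passes by one left-to-right scan
-- substituting the first matching key at each position (objective: alternative, same cost).

-- ===== PORT A =====
-- A's dict literal in insertion order; .items() iterates exactly this list.
def pvTranslations : List (String × String) :=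
  [("medication", "دارو"), ("medicine", "دارو"), ("pain", "درد"), ("fever", "تب"),
   ("infection", "عفونت"), ("antibiotic", "آنتی‌بیوتیک"), ("tablet", "قرص"),
   ("capsule", "کپسول"), ("doctor", "دکتر"), ("treatment", "درمان"),
   ("dosage", "دوز"), ("side effects", "عوارض جانبی")]

def get_fallback_translation_py (english_text : String) : String :=
  -- for eng, per in translations.items(): persian_text = persian_text.replace(eng, per)
  let persian_text := pvTranslations.foldl (fun acc kv => PySem.Str.replace acc kv.1 kv.2) english_text
  -- f"ترجمه فارسی: {persian_text}" (code-point concatenation)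
  String.ofList ("ترجمه فارسی: ".toList ++ persian_text.toList)

-- ===== PORT B =====
-- Source B's module-level _PAIRS, as code-point lists (standalone, not derived from A's table)
def pvPairs : List (List Char × List Char) :=
  [(['m','e','d','i','c','a','t','i','o','n'], "دارو".toList),
   (['m','e','d','i','c','i','n','e'], "دارو".toList),
   (['p','a','i','n'], "درد".toList),
   (['f','e','v','e','r'], "تب".toList),
   (['i','n','f','e','c','t','i','o','n'], "عفونت".toList),
   (['a','n','t','i','b','i','o','t','i','c'], "آنتی‌بیوتیک".toList),
   (['t','a','b','l','e','t'], "قرص".toList),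
   (['c','a','p','s','u','l','e'], "کپسول".toList),
   (['d','o','c','t','o','r'], "دکتر".toList),
   (['t','r','e','a','t','m','e','n','t'], "درمان".toList),
   (['d','o','s','a','g','e'], "دوز".toList),
   (['s','i','d','e',' ','e','f','f','e','c','t','s'], "عوارض جانبی".toList)]

-- inner 'for eng, per in _PAIRS: if english_text.startswith(eng, i): … break'
def pvFindMatch (ps : List (List Char × List Char)) (s : List Char) : Option (List Char × List Char) :=
  ps.find? (fun kv => kv.1.isPrefixOf s)

-- the 'while i < n' scan: at each position emit the first matching key's translation, else the char
def pvScan (ps : List (List Char × List Char)) (s : List Char) : List Char :=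
  match s with
  | [] => []
  | x :: t =>
    match pvFindMatch ps (x :: t) with
    | some kv => kv.2 ++ pvScan ps (t.drop (kv.1.length - 1))
    | none => x :: pvScan ps t
termination_by s.length
decreasing_by all_goals simp

def get_fallback_translation_py_alt (english_text : String) : String :=
  -- 'return "ترجمه فارسی: " + "".join(out)'
  "ترجمه فارسی: " ++ String.ofList (pvScan pvPairs english_text.toList)

-- ===== PRECONDITION & SPEC =====
-- Pre_ excludes inputs containing the substring "treatmentablet", the one place where two
-- dictionary keys overlap in the text: there A's dict-order sequential replacement and B's
-- leftmost match pick different overlapping keys, an accidental corner neither behaviour of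
-- which anyone would specify; on every other input the two agree.
def Pre_get_fallback_translation_py (english_text : String) : Prop :=
  PySem.Str.isIn "treatmentablet" english_text = false
instance (english_text : String) : Decidable (Pre_get_fallback_translation_py english_text) := by
  unfold Pre_get_fallback_translation_py; infer_instance

def pvWitness_get_fallback_translation_py : String := "take one tablet for pain"

def Spec_get_fallback_translation_py (english_text : String) (out : String) : Prop :=
  out = get_fallback_translation_py_alt english_text
instance (english_text : String) (out : String) : Decidable (Spec_get_fallback_translation_py english_text out) := by
  unfold Spec_get_fallback_translation_py; infer_instance

-- ===== CLAIM (what is proved, stated in full; the proofs are below) =====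
def Claim_equal_get_fallback_translation_py : Prop :=
  ∀ (english_text : String), Dom_get_fallback_translation_py english_text →
    Pre_get_fallback_translation_py english_text →
    Spec_get_fallback_translation_py english_text (get_fallback_translation_py english_text)

-- ===== LEMMAS AND PROOFS =====

-- structural form of Python str.replace for a nonempty pattern
def pvRep (k v s : List Char) : List Char :=
  match s with
  | [] => []
  | x :: t =>
    if k.isPrefixOf (x :: t) then v ++ pvRep k v (t.drop (k.length - 1))
    else x :: pvRep k v t
termination_by s.length
decreasing_by all_goals simp

-- hypotheses about a pair list
def pvKeysOK (ps : List (List Char × List Char)) : Prop := ∀ kv ∈ ps, kv.1 ≠ [] ∧ kv.2 ≠ []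
def pvNoPrefix (ps : List (List Char × List Char)) : Prop :=
  List.Pairwise (fun a b => ¬ a.1 <+: b.1 ∧ ¬ b.1 <+: a.1) ps
def pvNoInnerPrefix (ps : List (List Char × List Char)) : Prop :=
  List.Pairwise (fun a b => ∀ p < b.1.length, 0 < p → ¬ a.1 <+: b.1.drop p) ps
def pvValsDisj (ps : List (List Char × List Char)) : Prop :=
  List.Pairwise (fun a b => ∀ c ∈ a.2, c ∉ b.1) ps
def pvCollisionFree (ps : List (List Char × List Char)) (s : List Char) : Prop :=
  List.Pairwise (fun a b => ∀ p < b.1.length, 0 < p → b.1.drop p <+: a.1 →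
    ¬ (b.1.take p ++ a.1) <:+: s) ps

def pvBadWord : List Char := "treatmentablet".toList

-- general list facts
theorem pvPrefixAppendCases (a b c : List Char) (h : a <+: b ++ c) : a <+: b ∨ b <+: a := by
  rcases le_total a.length b.length with hle | hle
  · exact Or.inl (List.prefix_of_prefix_length_le h (List.prefix_append b c) hle)
  · exact Or.inr (List.prefix_of_prefix_length_le (List.prefix_append b c) h hle)

theorem pvInfixOfDrop (w l : List Char) (n : Nat) (h : w <:+: l.drop n) : w <:+: l :=
  h.trans (List.drop_suffix n l).isInfix

-- PySem.Chars.replace agrees with pvRep for a nonempty pattern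
theorem pvRepGo (k v : List Char) (hk : k ≠ []) :
    ∀ fuel (l acc : List Char), l.length ≤ fuel →
      PySem.Chars.replace.go k v fuel l acc = acc.reverse ++ pvRep k v l := by
  intro fuel
  induction fuel with
  | zero =>
    intro l acc hl
    have : l = [] := List.eq_nil_of_length_eq_zero (Nat.le_zero.mp hl)
    subst this
    rw [PySem.Chars.replace.go]
    simp [pvRep]
  | succ fuel ih =>
    intro l acc hl
    cases l with
    | nil => rw [PySem.Chars.replace.go]; simp [pvRep]; omega
    | cons c t =>
      rw [PySem.Chars.replace.go]
      by_cases hp : k.isPrefixOf (c :: t)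
      · simp only [hp, if_true]
        have hk1 : 1 ≤ k.length := by
          cases k with
          | nil => exact absurd rfl hk
          | cons a b => simp
        have hdrop : List.drop k.length (c :: t) = t.drop (k.length - 1) := by
          conv_lhs => rw [show k.length = (k.length - 1) + 1 from by omega]
          rw [List.drop_succ_cons]
        have hlen : (List.drop k.length (c :: t)).length ≤ fuel := by
          simp at hl ⊢; omega
        rw [ih _ _ hlen, pvRep, if_pos hp, hdrop]
        simp
      · simp only [hp, Bool.false_eq_true, if_false]
        have hlen : t.length ≤ fuel := by simp at hl; omega
        rw [ih _ _ hlen, pvRep, if_neg hp]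
        simp

theorem pvReplaceEq (k v s : List Char) (hk : k ≠ []) :
    PySem.Chars.replace s k v = pvRep k v s := by
  rw [PySem.Chars.replace]
  have : k.isEmpty = false := by cases k with | nil => exact absurd rfl hk | cons a b => rfl
  rw [this]
  simpa using pvRepGo k v hk s.length s [] le_rfl

theorem pvFoldAToList (l : List (String × String)) (s : String)
    (h : ∀ kv ∈ l, kv.1.toList ≠ []) :
    (l.foldl (fun acc kv => PySem.Str.replace acc kv.1 kv.2) s).toList =
      (l.map (fun kv => (kv.1.toList, kv.2.toList))).foldl
        (fun acc kv => pvRep kv.1 kv.2 acc) s.toList := by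
  induction l generalizing s with
  | nil => simp
  | cons kv tl ih =>
    simp only [List.foldl_cons, List.map_cons]
    rw [ih _ (fun kv' hkv' => h kv' (List.mem_cons_of_mem _ hkv'))]
    congr 1
    rw [PySem.Str.toList_replace, pvReplaceEq _ _ _ (h kv List.mem_cons_self)]

-- scan facts
theorem pvScanNil (s : List Char) : pvScan [] s = s := by
  induction s with
  | nil => simp [pvScan]
  | cons x t ih => rw [pvScan]; simp [pvFindMatch, ih]

theorem pvScanConsSome (ps : List (List Char × List Char)) (x : Char) (t : List Char)
    (kv : List Char × List Char) (h : pvFindMatch ps (x :: t) = some kv) :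
    pvScan ps (x :: t) = kv.2 ++ pvScan ps (t.drop (kv.1.length - 1)) := by
  rw [pvScan, h]

theorem pvScanConsNone (ps : List (List Char × List Char)) (x : Char) (t : List Char)
    (h : pvFindMatch ps (x :: t) = none) :
    pvScan ps (x :: t) = x :: pvScan ps t := by
  rw [pvScan, h]

theorem pvFindMatchNone (ps : List (List Char × List Char)) (s : List Char) :
    pvFindMatch ps s = none ↔ ∀ kv ∈ ps, ¬ kv.1 <+: s := by
  simp [pvFindMatch, List.find?_eq_none, List.isPrefixOf_iff_prefix]

theorem pvFindMatchSome (ps : List (List Char × List Char)) (s : List Char)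
    (kv : List Char × List Char) (h : pvFindMatch ps s = some kv) :
    kv ∈ ps ∧ kv.1 <+: s := by
  unfold pvFindMatch at h
  have hp := List.find?_some (p := fun kv : List Char × List Char => kv.1.isPrefixOf s) h
  exact ⟨List.mem_of_find?_eq_some h, List.isPrefixOf_iff_prefix.mp hp⟩

theorem pvFindMatchStable (rest : List (List Char × List Char)) (s u : List Char)
    (kv : List Char × List Char)
    (hnp2 : pvNoPrefix rest) (hrk : ∀ kv' ∈ rest, kv'.1 ≠ [])
    (h : pvFindMatch rest s = some kv) :
    pvFindMatch rest (kv.1 ++ u) = some kv := by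
  induction rest with
  | nil => simp [pvFindMatch] at h
  | cons a r ih =>
    unfold pvFindMatch at h ⊢
    by_cases ha : a.1.isPrefixOf s
    · rw [List.find?_cons_of_pos (p := fun kv : List Char × List Char => kv.1.isPrefixOf s) ha] at h
      obtain rfl := Option.some.inj h
      rw [List.find?_cons_of_pos]
      exact List.isPrefixOf_iff_prefix.mpr (List.prefix_append a.1 u)
    · rw [List.find?_cons_of_neg (p := fun kv : List Char × List Char => kv.1.isPrefixOf s) (by simpa using ha)] at h
      have hmem := List.mem_of_find?_eq_some h
      have hab := (List.pairwise_cons.mp hnp2).1 kv hmem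
      have hnotpre : ¬ a.1.isPrefixOf (kv.1 ++ u) = true := by
        rw [List.isPrefixOf_iff_prefix]
        intro hp
        rcases pvPrefixAppendCases a.1 kv.1 u hp with h1 | h2
        · exact hab.1 h1
        · exact hab.2 h2
      rw [List.find?_cons_of_neg (p := fun kv' : List Char × List Char => kv'.1.isPrefixOf (kv.1 ++ u)) hnotpre]
      exact ih (List.pairwise_cons.mp hnp2).2
        (fun kv' hkv' => hrk kv' (List.mem_cons_of_mem _ hkv')) h

theorem pvScanPrepend (ps : List (List Char × List Char)) (v' u : List Char)
    (hrk : ∀ kv ∈ ps, kv.1 ≠ []) (hvd : ∀ c ∈ v', ∀ kv ∈ ps, c ∉ kv.1) :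
    pvScan ps (v' ++ u) = v' ++ pvScan ps u := by
  induction v' with
  | nil => simp
  | cons c v'' ih =>
    have hnone : pvFindMatch ps (c :: (v'' ++ u)) = none := by
      rw [pvFindMatchNone]
      intro kv hkv hpre
      cases hk1 : kv.1 with
      | nil => exact hrk kv hkv hk1
      | cons d r =>
        rw [hk1] at hpre
        have hdc := (List.cons_prefix_cons.mp hpre).1
        exact hvd c List.mem_cons_self kv hkv (by rw [hk1, hdc]; exact List.mem_cons_self)
    rw [List.cons_append, pvScan]
    simp only [hnone]
    rw [ih (fun c hc => hvd c (List.mem_cons_of_mem _ hc))]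
    simp

-- a prefix of a replaced string that avoids the replacement's characters is a prefix of the original
theorem pvInfixDropVals (v' u w : List Char) (hw : w ≠ []) (hd : ∀ c ∈ v', c ∉ w)
    (h : w <:+: v' ++ u) : w <:+: u := by
  induction v' with
  | nil => simpa using h
  | cons c v'' ih =>
    rcases List.infix_cons_iff.mp h with hpre | hinf
    · cases w with
      | nil => exact absurd rfl hw
      | cons d w' =>
        have hdc := (List.cons_prefix_cons.mp hpre).1
        exact ((hd c List.mem_cons_self) (by rw [hdc]; exact List.mem_cons_self)).elim
    · exact ih (fun c hc => hd c (List.mem_cons_of_mem _ hc)) hinf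

theorem pvPrefixRep (k v t w : List Char) (hv : v ≠ []) (hd : ∀ c ∈ v, c ∉ w)
    (h : w <+: pvRep k v t) : w <+: t := by
  induction t generalizing w with
  | nil => simpa [pvRep] using h
  | cons x t' ih =>
    rw [pvRep] at h
    by_cases hp : k.isPrefixOf (x :: t')
    · rw [if_pos hp] at h
      cases w with
      | nil => exact List.nil_prefix
      | cons d w' =>
        obtain ⟨c, v', rfl⟩ : ∃ c v', v = c :: v' := by
          cases v with
          | nil => exact absurd rfl hv
          | cons a b => exact ⟨a, b, rfl⟩
        have hdc := (List.cons_prefix_cons.mp h).1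
        exact ((hd c List.mem_cons_self) (by rw [hdc]; exact List.mem_cons_self)).elim
    · rw [if_neg hp] at h
      cases w with
      | nil => exact List.nil_prefix
      | cons d w' =>
        have hdx := List.cons_prefix_cons.mp h
        have hrec : w' <+: t' :=
          ih w' (fun c hc hcw => hd c hc (List.mem_cons_of_mem _ hcw)) hdx.2
        exact List.cons_prefix_cons.mpr ⟨hdx.1, hrec⟩

-- an infix of a replaced string that avoids the replacement's characters is an infix of the original
theorem pvInfixRep (k v s w : List Char) (hv : v ≠ []) (hw : w ≠ []) (hd : ∀ c ∈ v, c ∉ w)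
    (h : w <:+: pvRep k v s) : w <:+: s := by
  have H : ∀ n (s : List Char), s.length ≤ n → w <:+: pvRep k v s → w <:+: s := by
    intro n
    induction n with
    | zero =>
      intro s hs h
      have : s = [] := List.eq_nil_of_length_eq_zero (Nat.le_zero.mp hs)
      subst this; simp [pvRep] at h; exact absurd h hw
    | succ n ih =>
      intro s hs h
      cases s with
      | nil => simp [pvRep] at h; exact absurd h hw
      | cons x t =>
        rw [pvRep] at h
        by_cases hp : k.isPrefixOf (x :: t)
        · rw [if_pos hp] at h
          have h2 := pvInfixDropVals v _ w hw hd h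
          have h3 := ih (t.drop (k.length - 1))
            (by simp at hs ⊢; omega) h2
          exact List.infix_cons (pvInfixOfDrop w t _ h3)
        · rw [if_neg hp] at h
          rcases List.infix_cons_iff.mp h with hpre | hinf
          · cases w with
            | nil => exact absurd rfl hw
            | cons d w' =>
              have hdx := List.cons_prefix_cons.mp hpre
              have hrec : w' <+: t :=
                pvPrefixRep k v t w' hv (fun c hc hcw => hd c hc (List.mem_cons_of_mem _ hcw)) hdx.2
              exact (List.cons_prefix_cons.mpr ⟨hdx.1, hrec⟩).isInfix
          · exact List.infix_cons (ih t (by simp at hs; omega) hinf)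
  exact H s.length s le_rfl h

theorem pvRepSkip (k v s : List Char) (m : Nat) (hm : m ≤ s.length)
    (h : ∀ p < m, ¬ k <+: s.drop p) :
    pvRep k v s = s.take m ++ pvRep k v (s.drop m) := by
  induction m generalizing s with
  | zero => simp
  | succ m ih =>
    cases s with
    | nil => simp at hm
    | cons x t =>
      have h0 : ¬ k.isPrefixOf (x :: t) := by
        rw [List.isPrefixOf_iff_prefix]; simpa using h 0 (Nat.succ_pos m)
      rw [pvRep, if_neg h0]
      have := ih t (by simpa using hm) (fun p hp => by simpa using h (p + 1) (by omega))
      simp [this]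

-- the step: scanning with (k,v) first equals replacing k everywhere, then scanning the rest
theorem pvStep (k v : List Char) (rest : List (List Char × List Char)) (s : List Char)
    (hv : v ≠ [])
    (hrk : ∀ kv ∈ rest, kv.1 ≠ [])
    (hnp2 : pvNoPrefix rest)
    (hip : ∀ kv ∈ rest, ∀ p < kv.1.length, 0 < p → ¬ k <+: kv.1.drop p)
    (hvd : ∀ c ∈ v, ∀ kv ∈ rest, c ∉ kv.1)
    (hcf : ∀ kv ∈ rest, ∀ p < kv.1.length, 0 < p → kv.1.drop p <+: k →
      ¬ (kv.1.take p ++ k) <:+: s) :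
    pvScan ((k, v) :: rest) s = pvScan rest (pvRep k v s) := by
  have H : ∀ n (s : List Char), s.length ≤ n →
      (∀ kv ∈ rest, ∀ p < kv.1.length, 0 < p → kv.1.drop p <+: k →
        ¬ (kv.1.take p ++ k) <:+: s) →
      pvScan ((k, v) :: rest) s = pvScan rest (pvRep k v s) := by
    intro n
    induction n with
    | zero =>
      intro s hs _
      have : s = [] := List.eq_nil_of_length_eq_zero (Nat.le_zero.mp hs)
      subst this
      simp [pvScan, pvRep]
    | succ n ih =>
      intro s hs hcf
      cases s with
      | nil => simp [pvScan, pvRep]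
      | cons x t =>
        by_cases hk0 : k <+: (x :: t)
        · -- the head key matches at position 0: both sides emit v and continue past it
          have hfm : pvFindMatch ((k, v) :: rest) (x :: t) = some (k, v) := by
            unfold pvFindMatch
            exact List.find?_cons_of_pos
              (p := fun kv : List Char × List Char => kv.1.isPrefixOf (x :: t))
              (List.isPrefixOf_iff_prefix.mpr hk0)
          rw [pvScanConsSome _ _ _ _ hfm]
          have hrep : pvRep k v (x :: t) = v ++ pvRep k v (t.drop (k.length - 1)) := by
            rw [pvRep, if_pos (List.isPrefixOf_iff_prefix.mpr hk0)]
          rw [hrep, pvScanPrepend rest v _ hrk (fun c hc kv hkv => hvd c hc kv hkv)]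
          congr 1
          exact ih (t.drop (k.length - 1)) (by simp at hs ⊢; omega)
            (fun kv hkv p hp hp0 hdp hinf =>
              hcf kv hkv p hp hp0 hdp (List.infix_cons (pvInfixOfDrop _ t _ hinf)))
        · have hfm0 : ¬ k.isPrefixOf (x :: t) = true := fun hc => hk0 (List.isPrefixOf_iff_prefix.mp hc)
          cases hm : pvFindMatch rest (x :: t) with
          | some kv =>
            -- a later key matches at position 0; A's replace pass leaves that window intact
            obtain ⟨hmem, hpre⟩ := pvFindMatchSome rest _ kv hm
            have hk' : kv.1 ≠ [] := hrk kv hmem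
            obtain ⟨u, hu⟩ := hpre
            have hfm : pvFindMatch ((k, v) :: rest) (x :: t) = some kv := by
              unfold pvFindMatch at hm ⊢
              rw [List.find?_cons_of_neg
                (p := fun kv : List Char × List Char => kv.1.isPrefixOf (x :: t)) hfm0]
              exact hm
            rw [pvScanConsSome _ _ _ _ hfm]
            have hnomatch : ∀ p < kv.1.length, ¬ k <+: (x :: t).drop p := by
              intro p hp
              cases Nat.eq_zero_or_pos p with
              | inl h0 => subst h0; simpa using hk0
              | inr hp0 =>
                have hdp : (x :: t).drop p = kv.1.drop p ++ u := by
                  rw [← hu, List.drop_append_of_le_length (Nat.le_of_lt hp)]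
                rw [hdp]
                intro hkp
                rcases pvPrefixAppendCases k (kv.1.drop p) u hkp with h1 | h2
                · exact hip kv hmem p hp hp0 h1
                · apply hcf kv hmem p hp hp0 h2
                  have hx : x :: t = kv.1.take p ++ (kv.1.drop p ++ u) := by
                    rw [← List.append_assoc, List.take_append_drop, hu]
                  rw [hx]
                  exact ((List.prefix_append_right_inj (kv.1.take p)).mpr hkp).isInfix
            have hskip : pvRep k v (x :: t) = kv.1 ++ pvRep k v u := by
              have hle : kv.1.length ≤ (x :: t).length := by
                rw [← hu]; simp
              rw [pvRepSkip k v (x :: t) kv.1.length hle hnomatch, ← hu]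
              rw [List.take_left, List.drop_left]
            rw [hskip]
            have hfm2 : pvFindMatch rest (kv.1 ++ pvRep k v u) = some kv :=
              pvFindMatchStable rest _ _ kv hnp2 hrk hm
            obtain ⟨c, kc, hk1⟩ : ∃ c kc, kv.1 = c :: kc := by
              cases hkk : kv.1 with
              | nil => exact absurd hkk hk'
              | cons a b => exact ⟨a, b, rfl⟩
            have ht : t = kc ++ u := by
              rw [hk1, List.cons_append] at hu
              exact (List.cons.injEq c _ x t ▸ hu).2.symm
            have hscanr : pvScan rest (kv.1 ++ pvRep k v u) = kv.2 ++ pvScan rest (pvRep k v u) := by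
              rw [hk1, List.cons_append] at hfm2 ⊢
              rw [pvScanConsSome _ _ _ _ hfm2, hk1]
              simp
            rw [hscanr]
            have hdropl : t.drop (kv.1.length - 1) = u := by
              rw [ht, hk1]
              simp
            rw [hdropl]
            congr 1
            have hul : u.length ≤ n := by
              have hlen := congrArg List.length hu
              rw [hk1] at hlen
              simp at hlen hs
              omega
            exact ih u hul
              (fun kv' hkv' p hp hp0 hdp hinf => by
                refine hcf kv' hkv' p hp hp0 hdp ?_
                have hsuf : u <:+ x :: t := ⟨kv.1, hu⟩
                exact hinf.trans hsuf.isInfix)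
          | none =>
            -- no key matches at position 0: both sides copy the character
            have hfm : pvFindMatch ((k, v) :: rest) (x :: t) = none := by
              unfold pvFindMatch at hm ⊢
              rw [List.find?_cons_of_neg
                (p := fun kv : List Char × List Char => kv.1.isPrefixOf (x :: t)) hfm0]
              exact hm
            rw [pvScanConsNone _ _ _ hfm]
            have hrepx : pvRep k v (x :: t) = x :: pvRep k v t := by
              rw [pvRep, if_neg hfm0]
            rw [hrepx]
            have hnone2 : pvFindMatch rest (x :: pvRep k v t) = none := by
              rw [pvFindMatchNone]
              intro kv hkv hpre
              cases hk1 : kv.1 with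
              | nil => exact hrk kv hkv hk1
              | cons d w' =>
                rw [hk1] at hpre
                have hdx := List.cons_prefix_cons.mp hpre
                have hw't : w' <+: t :=
                  pvPrefixRep k v t w' hv
                    (fun c hc hcw => hvd c hc kv hkv (by rw [hk1]; exact List.mem_cons_of_mem _ hcw))
                    hdx.2
                have hkvp : kv.1 <+: x :: t := by
                  rw [hk1]; exact List.cons_prefix_cons.mpr ⟨hdx.1, hw't⟩
                exact (pvFindMatchNone rest (x :: t)).mp hm kv hkv hkvp
            rw [pvScanConsNone _ _ _ hnone2]
            congr 1
            exact ih t (by simp at hs; omega)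
              (fun kv hkv p hp hp0 hdp hinf =>
                hcf kv hkv p hp hp0 hdp (List.infix_cons hinf))
  exact H s.length s le_rfl hcf

theorem pvScanEqFoldl (ps : List (List Char × List Char)) (s : List Char)
    (h1 : pvKeysOK ps) (h2 : pvNoPrefix ps) (h3 : pvNoInnerPrefix ps)
    (h4 : pvValsDisj ps) (h5 : pvCollisionFree ps s) :
    pvScan ps s = ps.foldl (fun acc kv => pvRep kv.1 kv.2 acc) s := by
  induction ps generalizing s with
  | nil => simpa using pvScanNil s
  | cons kv rest ih =>
    obtain ⟨k, v⟩ := kv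
    have hv := (h1 _ List.mem_cons_self).2
    have h1' : pvKeysOK rest := fun kv' hkv' => h1 kv' (List.mem_cons_of_mem _ hkv')
    have hrk : ∀ kv' ∈ rest, kv'.1 ≠ [] := fun kv' hkv' => (h1' kv' hkv').1
    have hnp2 := (List.pairwise_cons.mp h2).2
    have hip := (List.pairwise_cons.mp h3).1
    have hip2 := (List.pairwise_cons.mp h3).2
    have hcf := (List.pairwise_cons.mp h5).1
    have hcf2 := (List.pairwise_cons.mp h5).2
    have hvd1 := (List.pairwise_cons.mp h4).1
    have hvd : ∀ c ∈ v, ∀ kv' ∈ rest, c ∉ kv'.1 := fun c hc kv' hkv' => hvd1 kv' hkv' c hc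
    rw [List.foldl_cons]
    rw [pvStep k v rest s hv hrk hnp2 hip hvd hcf]
    refine ih (pvRep k v s) h1' hnp2 hip2 (List.pairwise_cons.mp h4).2 ?_
    refine List.Pairwise.imp_of_mem ?_ hcf2
    intro a b ha hb hab p hp hp0 hdp hinf
    refine hab p hp hp0 hdp ?_
    refine pvInfixRep k v s _ hv ?_ ?_ hinf
    · intro hnil
      exact (h1' a ha).1 (List.append_eq_nil_iff.mp hnil).2
    · intro c hc hcmem
      rcases List.mem_append.mp hcmem with hmem1 | hmem2
      · exact hvd1 b hb c hc (List.mem_of_mem_take hmem1)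
      · exact hvd1 a ha c hc hmem2

theorem pvPairsCF (s : List Char) (h : ¬ pvBadWord <:+: s) : pvCollisionFree pvPairs s := by
  have hpair : List.Pairwise (fun a b : List Char × List Char =>
      ∀ p < b.1.length, 0 < p → b.1.drop p <+: a.1 → b.1.take p ++ a.1 = pvBadWord) pvPairs := by
    decide
  refine List.Pairwise.imp ?_ hpair
  intro a b hab p hp hp0 hdp hinf
  exact h ((hab p hp hp0 hdp) ▸ hinf)

set_option maxRecDepth 8192 in
theorem pvPairsValsDisj : pvValsDisj pvPairs := by
  have hb : List.Pairwise
      (fun a b : List Char × List Char => a.2.all (fun c => !(b.1.contains c)) = true) pvPairs := by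
    decide
  unfold pvValsDisj
  refine hb.imp ?_
  intro a b hab c hc hmem
  have h2 := List.all_eq_true.mp hab c hc
  simp at h2
  exact h2 hmem

-- B's standalone pair table is A's dict, key/value strings taken apart into code points
set_option maxRecDepth 8192 in
theorem pvMapEq : pvTranslations.map (fun kv => (kv.1.toList, kv.2.toList)) = pvPairs := by
  decide

-- ===== VERDICT (by name: the statement is the Claim_ definition above) =====
set_option maxRecDepth 8192 in
theorem get_fallback_translation_py_spec : Claim_equal_get_fallback_translation_py := by
  unfold Claim_equal_get_fallback_translation_py
  intro s _ hpre
  unfold Spec_get_fallback_translation_py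
  unfold get_fallback_translation_py get_fallback_translation_py_alt
  have hbad : ¬ pvBadWord <:+: s.toList := by
    intro hinf
    have := (PySem.Str.isIn_iff_infix "treatmentablet" s).mpr hinf
    rw [Pre_get_fallback_translation_py] at hpre
    rw [this] at hpre
    simp at hpre
  have hlist : (pvTranslations.foldl (fun acc kv => PySem.Str.replace acc kv.1 kv.2) s).toList =
      pvScan pvPairs s.toList := by
    rw [pvFoldAToList pvTranslations s (by decide), pvMapEq]
    exact (pvScanEqFoldl pvPairs s.toList (by unfold pvKeysOK; decide)
      (by unfold pvNoPrefix; decide) (by unfold pvNoInnerPrefix; decide) pvPairsValsDisj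
      (pvPairsCF _ hbad)).symm
  apply String.toList_injective
  simp [hlist]
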